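-- pv_equiv track=rewrite | github.com/mauwqq/AyED1 | TPs/TP3/E1.py | columnas_palindromas
-- ===== SOURCE A (Python) =====
-- from typing import List
--
-- def columnas_palindromas(matriz: List[List[int]]) -> List[int]:
--     """Determina qué columnas de la matriz son palíndromos.
--
--     Pre: matriz es una lista de listas que representa una matriz cuadrada.
--
--     Post: Retorna una lista con los índices de las columnas que son palíndromos.
--
--     """
--     n = len(matriz)
--     palindromas = []
--     for c in range(n):
--         col = [matriz[r][c] for r in range(n)]
--         if col == col[::-1]:
--             palindromas.append(c)
--     return palindromas
-- ===== SOURCE B (Python) =====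
-- from typing import List
--
-- def columnas_palindromas(matriz: List[List[int]]) -> List[int]:
--     """Indices de columnas palindromicas: prueba de simetria con dos punteros,
--     sin construir la columna ni su reverso."""
--     n = len(matriz)
--     return [c for c in range(n)
--             if all(matriz[r][c] == matriz[n - 1 - r][c] for r in range(n // 2))]
-- ===== Notes on version B (the rewrite author's own statement) =====
-- stated objective: simpler
-- what changed: Instead of materialising each column as a list and comparing it with its reversal, B checks each column in place with a two-pointer symmetry test over only the first n//2 rows, with early exit via all().
import Mathlib
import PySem

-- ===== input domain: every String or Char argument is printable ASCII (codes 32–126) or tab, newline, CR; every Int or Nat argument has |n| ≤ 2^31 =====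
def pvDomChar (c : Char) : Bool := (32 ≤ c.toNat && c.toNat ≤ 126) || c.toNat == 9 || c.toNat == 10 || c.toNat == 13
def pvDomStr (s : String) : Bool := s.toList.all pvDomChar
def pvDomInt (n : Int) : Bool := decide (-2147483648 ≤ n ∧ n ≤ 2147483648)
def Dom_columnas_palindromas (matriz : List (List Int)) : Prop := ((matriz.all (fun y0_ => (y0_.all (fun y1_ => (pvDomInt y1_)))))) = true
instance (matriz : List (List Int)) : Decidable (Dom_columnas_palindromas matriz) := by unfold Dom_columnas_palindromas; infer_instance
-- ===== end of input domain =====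

-- B replaces A's build-each-column-and-compare-with-its-reversal by an in-place
-- two-pointer symmetry test over the first n//2 rows (no column list or reversal built).

-- ===== PORT A =====
-- col = [matriz[r][c] for r in range(n)]
def pvColA (matriz : List (List Int)) (n c : Int) : List Int :=
  (PySem.List.pyRange 0 n 1).map
    (fun r => PySem.List.pyGetD (PySem.List.pyGetD matriz r []) c 0)

def columnas_palindromas (matriz : List (List Int)) : List Int :=
  let n : Int := matriz.length
  (PySem.List.pyRange 0 n 1).foldl
    (fun palindromas c =>
      let col := pvColA matriz n c
      if col = (PySem.List.slice? col none none (-1)).getD [] then palindromas ++ [c]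
      else palindromas)
    []

-- ===== PORT B =====
def columnas_palindromas_alt (matriz : List (List Int)) : List Int :=
  let n : Int := matriz.length
  (PySem.List.pyRange 0 n 1).filter
    (fun c =>
      (PySem.List.pyRange 0 (PySem.Int.floordiv n 2) 1).all
        (fun r =>
          PySem.List.pyGetD (PySem.List.pyGetD matriz r []) c 0
            == PySem.List.pyGetD (PySem.List.pyGetD matriz (n - 1 - r) []) c 0))

-- ===== PRECONDITION & SPEC =====
-- Pre_ excludes non-square inputs (a row shorter than len(matriz)), on which the Python A raises IndexError.
def Pre_columnas_palindromas (matriz : List (List Int)) : Prop :=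
  ∀ row ∈ matriz, matriz.length ≤ row.length
instance (matriz : List (List Int)) : Decidable (Pre_columnas_palindromas matriz) := by
  unfold Pre_columnas_palindromas; infer_instance

def pvWitness_columnas_palindromas : List (List Int) := [[1, 2], [3, 2]]

def Spec_columnas_palindromas (matriz : List (List Int)) (out : List Int) : Prop := out = columnas_palindromas_alt matriz
instance (matriz : List (List Int)) (out : List Int) : Decidable (Spec_columnas_palindromas matriz out) := by unfold Spec_columnas_palindromas; infer_instance

-- ===== CLAIM (what is proved, stated in full; the proofs are below) =====
def Claim_equal_columnas_palindromas : Prop := ∀ (matriz : List (List Int)), Dom_columnas_palindromas matriz → Pre_columnas_palindromas matriz → Spec_columnas_palindromas matriz (columnas_palindromas matriz)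

-- ===== LEMMAS AND PROOFS =====

-- a list equals its reverse iff each entry in the first half equals its mirror entry
lemma reverse_eq_iff_half (l : List Int) :
    l = l.reverse ↔ ∀ i : Nat, i < l.length / 2 →
      l.getD i 0 = l.getD (l.length - 1 - i) 0 := by
  constructor
  · intro h i hi
    have hlen : i < l.length := by omega
    have h2 : l.length - 1 - i < l.length := by omega
    rw [List.getD_eq_getElem _ _ hlen, List.getD_eq_getElem _ _ h2]
    calc l[i] = l.reverse[i]'(by simpa using hlen) := by
          exact (congrArg (fun t => t.getD i 0) h).trans (List.getD_eq_getElem _ _ _)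
            |>.symm.trans (List.getD_eq_getElem _ _ _) |>.symm
      _ = l[l.length - 1 - i] := by rw [List.getElem_reverse]
  · intro h
    apply List.ext_getElem (by simp)
    intro i h1 h2
    rw [List.getElem_reverse]
    by_cases hc : i < l.length / 2
    · have := h i hc
      rw [List.getD_eq_getElem _ _ (by omega), List.getD_eq_getElem _ _ (by omega)] at this
      exact this
    · by_cases hc2 : l.length - 1 - i < l.length / 2
      · have := h _ hc2
        rw [List.getD_eq_getElem _ _ (by omega), List.getD_eq_getElem _ _ (by omega)] at this
        have he : l.length - 1 - (l.length - 1 - i) = i := by omega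
        simp only [he] at this
        exact this.symm
      · congr 1; omega

-- the two ports agree on every input (the precondition is not even needed for the ports)
lemma ports_agree (matriz : List (List Int)) :
    columnas_palindromas matriz = columnas_palindromas_alt matriz := by
  unfold columnas_palindromas columnas_palindromas_alt
  simp only [PySem.List.slice?_none_none_neg_one, Option.getD_some]
  set m : Nat := matriz.length with hm
  have hfold := PySem.List.foldl_append_if
      (fun c => decide (pvColA matriz (m:Int) c = (pvColA matriz (m:Int) c).reverse))
      (fun c : Int => c) (PySem.List.pyRange 0 (m:Int) 1) []
  simp only [decide_eq_true_eq, List.map_id'] at hfold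
  rw [hfold, List.nil_append]
  apply List.filter_congr
  intro c hc
  rw [PySem.List.mem_pyRange_one] at hc
  have hflo : PySem.Int.floordiv (m:Int) 2 = ((m / 2 : Nat) : Int) := by
    exact_mod_cast PySem.Int.floordiv_natCast m 2
  rw [hflo]
  set f : Int → Int :=
    fun r => PySem.List.pyGetD (PySem.List.pyGetD matriz r []) c 0 with hf
  have hcol : pvColA matriz (m:Int) c = (PySem.List.pyRange 0 (m:Int) 1).map f := rfl
  have hlen : (pvColA matriz (m:Int) c).length = m := by
    rw [hcol]; simp [PySem.List.length_pyRange_one]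
  have hget : ∀ i : Nat, i < m → (pvColA matriz (m:Int) c).getD i 0 = f (i : Int) := by
    intro i hi
    have hi' : i < (pvColA matriz (m:Int) c).length := by omega
    rw [List.getD_eq_getElem _ _ hi']
    simp only [hcol, List.getElem_map, PySem.List.getElem_pyRange_one, zero_add]
  have key : (pvColA matriz (m:Int) c = (pvColA matriz (m:Int) c).reverse) ↔
      (∀ r : Int, 0 ≤ r → r < ((m / 2 : Nat) : Int) → f r = f ((m:Int) - 1 - r)) := by
    rw [reverse_eq_iff_half, hlen]
    constructor
    · intro h r h0 h1
      have hi2 : r.toNat < m / 2 := by omega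
      have := h r.toNat hi2
      rw [hget _ (by omega), hget _ (by omega)] at this
      rw [show ((r.toNat : Nat) : Int) = r by omega,
          show ((m - 1 - r.toNat : Nat) : Int) = (m:Int) - 1 - r by omega] at this
      exact this
    · intro h i hi
      have := h (i : Int) (by omega) (by omega)
      rw [hget _ (by omega), hget _ (by omega)]
      rw [show (m:Int) - 1 - (i:Int) = ((m - 1 - i : Nat) : Int) by omega] at this
      exact this
  rw [Bool.eq_iff_iff]
  simp only [decide_eq_true_eq, List.all_eq_true, PySem.List.mem_pyRange_one, beq_iff_eq]
  constructor
  · intro h r hr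
    exact key.mp h r hr.1 hr.2
  · intro h
    exact key.mpr (fun r h0 h1 => h r ⟨h0, h1⟩)

-- ===== VERDICT (by name: the statement is the Claim_ definition above) =====
theorem columnas_palindromas_spec : Claim_equal_columnas_palindromas := by
  intro matriz _ _
  unfold Spec_columnas_palindromas
  exact ports_agree matriz
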